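-- pv_equiv track=rewrite | github.com/sanjaypoojary121/land_trades | rag_pipeline.py | clean_final_answer
-- ===== SOURCE A (Python) =====
-- def clean_final_answer(answer: str) -> str:
--     bad_phrases = [
--         "not specified",
--         "no specific details available",
--         "information not available",
--         "not available in the dataset",
--         "no specific loan details available",
--     ]
--
--     lines = answer.split("\n")
--     cleaned = []
--
--     skip_next_empty_header = False
--
--     for i, line in enumerate(lines):
--         lower = line.lower().strip()
--
--         # Remove bad lines
--         if any(bp in lower for bp in bad_phrases):
--             continue
--
--         # Remove empty headers like "Amenities:" if no content after
--         if line.strip().endswith(":"):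
--             # Check next line
--             if i + 1 < len(lines):
--                 next_line = lines[i + 1].strip().lower()
--                 if any(bp in next_line for bp in bad_phrases):
--                     continue
--
--         cleaned.append(line)
--
--     return "\n".join(cleaned)
-- ===== SOURCE B (Python) =====
-- def clean_final_answer(answer: str) -> str:
--     bad_phrases = [
--         "not specified",
--         "no specific details available",
--         "information not available",
--         "not available in the dataset",
--         "no specific loan details available",
--     ]
--     # One backward pass: walk the lines last-to-first carrying a flag "is the
--     # following line bad?", so no index lookahead is ever needed; the kept
--     # lines are accumulated back-to-front and reversed once at the end.
--     kept_rev = []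
--     next_bad = False
--     for line in reversed(answer.split("\n")):
--         bad = any(bp in line.strip().lower() for bp in bad_phrases)
--         if not bad and not (line.strip().endswith(":") and next_bad):
--             kept_rev.append(line)
--         next_bad = bad
--     return "\n".join(reversed(kept_rev))
-- ===== Notes on version B (the rewrite author's own statement) =====
-- stated objective: alternative
-- what changed: Replaces A's forward loop with enumerate and an indexed lookahead (lines[i+1] re-scanned for bad phrases) by a single backward pass over reversed(lines) that carries a boolean flag recording whether the line just after the current one matched a bad phrase, appends kept lines back-to-front and reverses once at the end, so no indexing or duplicate phrase scan is needed.
import Mathlib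
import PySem

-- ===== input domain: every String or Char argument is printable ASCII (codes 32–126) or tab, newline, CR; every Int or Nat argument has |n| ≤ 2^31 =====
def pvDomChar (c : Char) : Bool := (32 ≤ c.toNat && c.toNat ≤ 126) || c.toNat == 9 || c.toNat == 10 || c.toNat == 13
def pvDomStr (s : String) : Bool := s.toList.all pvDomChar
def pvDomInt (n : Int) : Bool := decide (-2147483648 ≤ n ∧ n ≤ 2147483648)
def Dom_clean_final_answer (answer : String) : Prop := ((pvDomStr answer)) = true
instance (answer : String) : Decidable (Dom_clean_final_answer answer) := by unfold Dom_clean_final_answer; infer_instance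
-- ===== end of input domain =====

set_option maxHeartbeats 1000000

-- B replaces A's forward loop with index lookahead (lines[i+1] re-scanned for phrases) by a
-- single BACKWARD pass that carries a "following line is bad" flag; objective: alternative.

-- ===== PORT A =====
def clean_final_answer (answer : String) : String :=
  let bad_phrases : List String :=
    ["not specified", "no specific details available", "information not available",
     "not available in the dataset", "no specific loan details available"]
  let lines := (PySem.Str.split? answer "\n").getD []
  let cleaned := (PySem.List.enumerate lines).foldl (fun cleaned p =>
    let line := p.2
    let lower := PySem.Str.strip (PySem.Str.lower line)
    if bad_phrases.any (fun bp => PySem.Str.isIn bp lower) then cleaned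
    else if PySem.Str.endswith (PySem.Str.strip line) ":" then
      if p.1 + 1 < (lines.length : Int) then
        match PySem.List.pyGet? lines (p.1 + 1) with
        | some nx =>
            let next_line := PySem.Str.lower (PySem.Str.strip nx)
            if bad_phrases.any (fun bp => PySem.Str.isIn bp next_line) then cleaned
            else cleaned ++ [line]
        | none => cleaned ++ [line]
      else cleaned ++ [line]
    else cleaned ++ [line]) []
  PySem.Str.join "\n" cleaned

-- ===== PORT B =====
def clean_final_answer_alt (answer : String) : String :=
  let bad_phrases : List String :=
    ["not specified", "no specific details available", "information not available",
     "not available in the dataset", "no specific loan details available"]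
  let lines := (PySem.Str.split? answer "\n").getD []
  -- backward pass: state = (kept lines back-to-front, badness of the line that follows)
  let st := lines.reverse.foldl (fun (st : List String × Bool) line =>
    let bad := bad_phrases.any (fun bp => PySem.Str.isIn bp (PySem.Str.lower (PySem.Str.strip line)))
    (if !bad && !(PySem.Str.endswith (PySem.Str.strip line) ":" && st.2) then st.1 ++ [line]
     else st.1, bad)) ([], false)
  PySem.Str.join "\n" st.1.reverse

-- ===== PRECONDITION & SPEC =====
def Spec_clean_final_answer (answer : String) (out : String) : Prop := out = clean_final_answer_alt answer
instance (answer : String) (out : String) : Decidable (Spec_clean_final_answer answer out) := by unfold Spec_clean_final_answer; infer_instance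

-- ===== CLAIM (what is proved, stated in full; the proofs are below) =====
def Claim_equal_clean_final_answer : Prop := ∀ (answer : String), Dom_clean_final_answer answer → Spec_clean_final_answer answer (clean_final_answer answer)

-- ===== LEMMAS AND PROOFS =====
def cfaPhrases : List String :=
  ["not specified", "no specific details available", "information not available",
   "not available in the dataset", "no specific loan details available"]

-- badness as A writes it for the current line (lower then strip)
def cfaBadA (l : String) : Bool :=
  cfaPhrases.any (fun bp => PySem.Str.isIn bp (PySem.Str.strip (PySem.Str.lower l)))

-- badness as both write it for the lookahead / B's flag (strip then lower)
def cfaBadB (l : String) : Bool :=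
  cfaPhrases.any (fun bp => PySem.Str.isIn bp (PySem.Str.lower (PySem.Str.strip l)))

def cfaHeadBad : List String → Bool
  | [] => false
  | y :: _ => cfaBadB y

-- the common reference result: keep a line unless it is bad, or it is a header whose next line is bad
def cfaClean : List String → List String
  | [] => []
  | x :: xs =>
      (if !cfaBadB x && !(PySem.Str.endswith (PySem.Str.strip x) ":" && cfaHeadBad xs)
       then [x] else []) ++ cfaClean xs

-- the keep-decision A's loop makes for the enumerated pair p
def cfaKeepA (lines : List String) (p : Int × String) : Bool :=
  if cfaBadA p.2 then false
  else if PySem.Str.endswith (PySem.Str.strip p.2) ":" then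
    if p.1 + 1 < (lines.length : Int) then
      match PySem.List.pyGet? lines (p.1 + 1) with
      | some nx => !cfaBadB nx
      | none => true
    else true
  else true

lemma cfa_isspace_lowerChar (c : Char) :
    PySem.Chars.isspace (PySem.Chars.lowerChar c) = PySem.Chars.isspace c := by
  unfold PySem.Chars.lowerChar
  split
  · rename_i h
    simp only [PySem.Chars.isupper, Bool.and_eq_true, decide_eq_true_eq] at h
    have h1 : 65 ≤ c.toNat := h.1
    have h2 : c.toNat ≤ 90 := h.2
    have hv : (Char.ofNat (c.toNat + 32)).toNat = c.toNat + 32 := by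
      rw [Char.toNat_ofNat, if_pos (Or.inl (by omega))]
    have l : PySem.Chars.isspace (Char.ofNat (c.toNat + 32)) = false := by
      simp only [PySem.Chars.isspace, hv]
      simp only [Bool.or_eq_false_iff, Bool.and_eq_false_iff, decide_eq_false_iff_not]
      omega
    have r : PySem.Chars.isspace c = false := by
      simp only [PySem.Chars.isspace]
      simp only [Bool.or_eq_false_iff, Bool.and_eq_false_iff, decide_eq_false_iff_not]
      omega
    rw [l, r]
  · rfl

lemma cfa_strip_lower_chars (cs : List Char) :
    PySem.Chars.strip (PySem.Chars.lower cs) = PySem.Chars.lower (PySem.Chars.strip cs) := by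
  simp [PySem.Chars.strip, PySem.Chars.lstrip, PySem.Chars.rstrip, PySem.Chars.lower,
    List.dropWhile_map, ← List.map_reverse, Function.comp_def, cfa_isspace_lowerChar]

lemma cfa_strip_lower (s : String) :
    PySem.Str.strip (PySem.Str.lower s) = PySem.Str.lower (PySem.Str.strip s) := by
  simp [PySem.Str.strip, PySem.Str.lower, cfa_strip_lower_chars]

lemma cfaBadA_eq_cfaBadB (l : String) : cfaBadA l = cfaBadB l := by
  simp [cfaBadA, cfaBadB, cfa_strip_lower]

-- A's loop body is "append iff cfaKeepA"
lemma cfa_body_eq (lines : List String) :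
  (fun (cleaned : List String) (p : Int × String) =>
     if cfaPhrases.any (fun bp => PySem.Str.isIn bp (PySem.Str.strip (PySem.Str.lower p.2))) then cleaned
     else if PySem.Str.endswith (PySem.Str.strip p.2) ":" then
       if p.1 + 1 < (lines.length : Int) then
         match PySem.List.pyGet? lines (p.1 + 1) with
         | some nx =>
             if cfaPhrases.any (fun bp => PySem.Str.isIn bp (PySem.Str.lower (PySem.Str.strip nx))) then cleaned
             else cleaned ++ [p.2]
         | none => cleaned ++ [p.2]
       else cleaned ++ [p.2]
     else cleaned ++ [p.2])
  = fun acc p => if cfaKeepA lines p then acc ++ [p.2] else acc := by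
  funext acc p
  simp only [cfaKeepA, cfaBadA, cfaBadB]
  cases h1 : (cfaPhrases.any fun bp => PySem.Str.isIn bp (PySem.Str.strip (PySem.Str.lower p.2))) with
  | true => simp
  | false =>
    cases h2 : PySem.Str.endswith (PySem.Str.strip p.2) ":" with
    | false => simp
    | true =>
      by_cases h3 : p.1 + 1 < (lines.length : Int)
      · rw [if_pos h3, if_pos h3]
        cases h : PySem.List.pyGet? lines (p.1 + 1) with
        | none => simp
        | some nx =>
          cases hB : cfaPhrases.any (fun bp => PySem.Str.isIn bp (PySem.Str.lower (PySem.Str.strip nx))) <;>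
            simp only [hB] <;> simp
      · rw [if_neg h3, if_neg h3]; simp

lemma cfaHeadBad_cons (x : String) (xs : List String) : cfaHeadBad (x :: xs) = cfaBadB x := rfl

-- keep-decision of A at position j, given the suffix of lines starting at j
lemma cfa_keepA_suffix (lines : List String) (j : ℕ) (x : String) (xs : List String)
    (h : lines.drop j = x :: xs) :
    cfaKeepA lines ((j : Int), x)
      = (!cfaBadB x && !(PySem.Str.endswith (PySem.Str.strip x) ":" && cfaHeadBad xs)) := by
  have hjlen : j < lines.length := by
    by_contra hc
    rw [List.drop_eq_nil_of_le (by omega)] at h; exact (List.cons_ne_nil _ _ h.symm)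
  have hlen : lines.length = j + 1 + xs.length := by
    have := congrArg List.length h
    simp [List.length_drop] at this
    omega
  have hdd : lines.drop (j + 1) = xs := by
    rw [← List.drop_drop (i := 1) (j := j), h]
    rfl
  have hget : PySem.List.pyGet? lines ((j : Int) + 1) = xs.head? := by
    have h1 : ((j : Int) + 1) = ((j + 1 : ℕ) : Int) := by push_cast; ring
    rw [h1, PySem.List.pyGet?_natCast, ← List.head?_drop, hdd]
  simp only [cfaKeepA, cfaBadA_eq_cfaBadB, hget]
  cases hbx : cfaBadB x with
  | true => simp
  | false =>
    cases hend : PySem.Str.endswith (PySem.Str.strip x) ":" with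
    | false => simp
    | true =>
      simp only [Bool.not_false, Bool.true_and]
      cases xs with
      | nil =>
        have hnlt : ¬ ((j : Int) + 1 < (lines.length : Int)) := by
          simp [hlen]
        rw [if_neg hnlt]; simp [cfaHeadBad]
      | cons y ys =>
        have hlt : ((j : Int) + 1 < (lines.length : Int)) := by
          have : lines.length = j + 1 + (ys.length + 1) := by simpa using hlen
          omega
        rw [if_pos hlt]
        simp [cfaHeadBad]

-- A's fold over the enumeration of the suffix (drop j) produces cfaClean of that suffix
lemma cfa_foldA (lines : List String) : ∀ (xs : List String) (j : ℕ), lines.drop j = xs →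
    ∀ acc, (PySem.List.enumerate xs (j : Int)).foldl
        (fun acc p => if cfaKeepA lines p then acc ++ [p.2] else acc) acc
      = acc ++ cfaClean xs := by
  intro xs
  induction xs with
  | nil => intro j _ acc; simp [PySem.List.enumerate, cfaClean]
  | cons x xs ih =>
    intro j h acc
    have hdd : lines.drop (j + 1) = xs := by
      rw [← List.drop_drop (i := 1) (j := j), h]
      rfl
    rw [PySem.List.enumerate_cons, List.foldl_cons, cfa_keepA_suffix lines j x xs h]
    have h1 : ((j : Int) + 1) = ((j + 1 : ℕ) : Int) := by push_cast; ring
    rw [h1, ih (j + 1) hdd]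
    simp only [cfaClean]
    cases (!cfaBadB x && !(PySem.Str.endswith (PySem.Str.strip x) ":" && cfaHeadBad xs)) <;> simp

-- B's backward fold computes (cfaClean back-to-front, badness of the first line)
lemma cfa_foldB (lines : List String) :
    lines.reverse.foldl (fun (st : List String × Bool) line =>
      let bad := cfaPhrases.any (fun bp => PySem.Str.isIn bp (PySem.Str.lower (PySem.Str.strip line)))
      (if !bad && !(PySem.Str.endswith (PySem.Str.strip line) ":" && st.2) then st.1 ++ [line]
       else st.1, bad)) ([], false)
    = ((cfaClean lines).reverse, cfaHeadBad lines) := by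
  induction lines with
  | nil => simp [cfaClean, cfaHeadBad]
  | cons x xs ih =>
    rw [List.reverse_cons, List.foldl_append, ih]
    simp only [List.foldl_cons, List.foldl_nil]
    rw [show (cfaPhrases.any fun bp => PySem.Str.isIn bp (PySem.Str.lower (PySem.Str.strip x))) = cfaBadB x from rfl]
    simp only [cfaClean, cfaHeadBad_cons]
    cases cfaBadB x with
    | true => simp
    | false =>
      simp only [Bool.not_false, Bool.true_and]
      cases PySem.Str.endswith (PySem.Str.strip x) ":" with
      | false => simp
      | true => cases cfaHeadBad xs <;> simp

lemma cfa_main (lines : List String) :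
  PySem.Str.join "\n" ((PySem.List.enumerate lines).foldl (fun cleaned p =>
     if cfaPhrases.any (fun bp => PySem.Str.isIn bp (PySem.Str.strip (PySem.Str.lower p.2))) then cleaned
     else if PySem.Str.endswith (PySem.Str.strip p.2) ":" then
       if p.1 + 1 < (lines.length : Int) then
         match PySem.List.pyGet? lines (p.1 + 1) with
         | some nx =>
             if cfaPhrases.any (fun bp => PySem.Str.isIn bp (PySem.Str.lower (PySem.Str.strip nx))) then cleaned
             else cleaned ++ [p.2]
         | none => cleaned ++ [p.2]
       else cleaned ++ [p.2]
     else cleaned ++ [p.2]) [])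
  = PySem.Str.join "\n" (lines.reverse.foldl (fun (st : List String × Bool) line =>
      let bad := cfaPhrases.any (fun bp => PySem.Str.isIn bp (PySem.Str.lower (PySem.Str.strip line)))
      (if !bad && !(PySem.Str.endswith (PySem.Str.strip line) ":" && st.2) then st.1 ++ [line]
       else st.1, bad)) ([], false)).1.reverse := by
  have hA := cfa_foldA lines lines 0 (by simp) []
  simp only [Nat.cast_zero] at hA
  rw [cfa_body_eq lines, hA, cfa_foldB lines]
  simp

-- ===== VERDICT (by name: the statement is the Claim_ definition above) =====
theorem clean_final_answer_spec : Claim_equal_clean_final_answer := by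
  intro answer _
  unfold Spec_clean_final_answer clean_final_answer clean_final_answer_alt
  exact cfa_main ((PySem.Str.split? answer "\n").getD [])
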